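-- pv_equiv track=rewrite | github.com/pliptor/Interleavers | takeshita-costello/takeshita.py | GenerateDT
-- ===== SOURCE A (Python) =====
-- def GenerateDT(Length, Step, DShift, CShift):
--     Perm = [0]*Length
--     Count = 0
--     Point = DShift + CShift
--     Quest = Step + DShift
--     while Count < Length-1:
--         Quest %= Length
--         Point %= Length
--         Perm[Point] = Quest
--         Point = Quest + CShift
--         Count += 1
--         Quest += (Count+1) * Step
--     Point %= Length
--     Perm[Point] = DShift # Close last element.
--     return Perm
-- ===== SOURCE B (Python) =====
-- def GenerateDT(Length, Step, DShift, CShift):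
--     # Stateless closed form: Quest/Point are triangular-number progressions.
--     Perm = [0] * Length
--     for i in range(Length - 1):
--         Perm[(DShift + CShift + Step * i * (i + 1) // 2) % Length] = \
--             (DShift + Step * (i + 1) * (i + 2) // 2) % Length
--     Perm[(DShift + CShift + Step * (Length - 1) * Length // 2) % Length] = DShift
--     return Perm
-- ===== Notes on version B (the rewrite author's own statement) =====
-- stated objective: simpler
-- what changed: Replaces the stateful while-loop carrying running accumulators Quest/Point across iterations with a stateless single pass that writes each cell from closed-form triangular-number formulas, plus one unconditional close-write.
import Mathlib
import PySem

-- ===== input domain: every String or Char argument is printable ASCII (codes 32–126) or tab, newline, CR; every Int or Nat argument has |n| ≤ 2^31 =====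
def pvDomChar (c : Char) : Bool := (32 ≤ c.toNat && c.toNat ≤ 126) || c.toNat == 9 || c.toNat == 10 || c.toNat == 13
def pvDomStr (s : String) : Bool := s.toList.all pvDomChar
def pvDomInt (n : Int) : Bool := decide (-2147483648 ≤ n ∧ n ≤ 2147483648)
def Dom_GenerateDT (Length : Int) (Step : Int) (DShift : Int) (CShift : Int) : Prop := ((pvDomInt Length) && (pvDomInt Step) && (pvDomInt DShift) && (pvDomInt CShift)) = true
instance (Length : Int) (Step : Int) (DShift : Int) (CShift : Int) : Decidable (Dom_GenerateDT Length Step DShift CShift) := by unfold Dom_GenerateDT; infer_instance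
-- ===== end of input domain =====

-- B replaces A's running accumulators (Quest/Point) with stateless closed-form
-- triangular-number writes; objective: simpler (no state across iterations).


-- ===== PORT A =====
-- while Count < Length-1 runs exactly (Length-1).toNat iterations (Count starts at 0,
-- +1 each pass); ported as fuel recursion over that count, same state per iteration.
def GenerateDTLoop (Length : Int) (Step : Int) (CShift : Int) :
    Nat → Int → Int → Int → List Int → Int × List Int
  | 0, _Count, _Quest, Point, Perm => (Point, Perm)
  | n+1, Count, Quest, Point, Perm =>
      let Quest := PySem.Int.mod Quest Length
      let Point := PySem.Int.mod Point Length
      let Perm := PySem.List.pySetD Perm Point Quest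
      let Point := Quest + CShift
      let Count := Count + 1
      let Quest := Quest + (Count + 1) * Step
      GenerateDTLoop Length Step CShift n Count Quest Point Perm

def GenerateDT (Length : Int) (Step : Int) (DShift : Int) (CShift : Int) : List Int :=
  let Perm := List.replicate Length.toNat 0
  let r := GenerateDTLoop Length Step CShift (Length - 1).toNat 0 (Step + DShift) (DShift + CShift) Perm
  PySem.List.pySetD r.2 (PySem.Int.mod r.1 Length) DShift

-- ===== PORT B =====
def GenerateDT_alt (Length : Int) (Step : Int) (DShift : Int) (CShift : Int) : List Int :=
  let Perm := List.replicate Length.toNat 0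
  let Perm := (PySem.List.pyRange 0 (Length - 1) 1).foldl (fun Perm i =>
      PySem.List.pySetD Perm
        (PySem.Int.mod (DShift + CShift + PySem.Int.floordiv (Step * i * (i + 1)) 2) Length)
        (PySem.Int.mod (DShift + PySem.Int.floordiv (Step * (i + 1) * (i + 2)) 2) Length)) Perm
  PySem.List.pySetD Perm
    (PySem.Int.mod (DShift + CShift + PySem.Int.floordiv (Step * (Length - 1) * Length) 2) Length)
    DShift

-- ===== PRECONDITION & SPEC =====
-- Python A raises for Length ≤ 0 (ZeroDivisionError at 'Point %= Length' when Length = 0,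
-- IndexError on the empty list when Length < 0); those inputs are excluded.
def Pre_GenerateDT (Length : Int) (Step : Int) (DShift : Int) (CShift : Int) : Prop := 1 ≤ Length
instance (Length : Int) (Step : Int) (DShift : Int) (CShift : Int) : Decidable (Pre_GenerateDT Length Step DShift CShift) := by unfold Pre_GenerateDT; infer_instance
def pvWitness_GenerateDT : Int × Int × Int × Int := (5, 7, 3, 2)

def Spec_GenerateDT (Length : Int) (Step : Int) (DShift : Int) (CShift : Int) (out : List Int) : Prop := out = GenerateDT_alt Length Step DShift CShift
instance (Length : Int) (Step : Int) (DShift : Int) (CShift : Int) (out : List Int) : Decidable (Spec_GenerateDT Length Step DShift CShift out) := by unfold Spec_GenerateDT; infer_instance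

-- ===== CLAIM (what is proved, stated in full; the proofs are below) =====
def Claim_equal_GenerateDT : Prop := ∀ (Length : Int) (Step : Int) (DShift : Int) (CShift : Int), Dom_GenerateDT Length Step DShift CShift → Pre_GenerateDT Length Step DShift CShift → Spec_GenerateDT Length Step DShift CShift (GenerateDT Length Step DShift CShift)

-- ===== LEMMAS AND PROOFS =====

-- triangular numbers, as Int
def triN (k : Nat) : Int := ((k * (k + 1) / 2 : Nat) : Int)

theorem two_triN (k : Nat) : 2 * triN k = (k : Int) * ((k : Int) + 1) := by
  have h : 2 ∣ k * (k + 1) := (Nat.even_mul_succ_self k).two_dvd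
  have h2 : 2 * (k * (k + 1) / 2) = k * (k + 1) := Nat.mul_div_cancel' h
  unfold triN
  exact_mod_cast h2

theorem triN_succ (k : Nat) : triN (k + 1) = triN k + ((k : Int) + 1) := by
  have h1 := two_triN k
  have h2 := two_triN (k + 1)
  push_cast at h2
  have h3 : 2 * triN (k + 1) = 2 * triN k + 2 * ((k : Int) + 1) := by linear_combination h2 - h1
  omega

theorem fdiv_tri (Step : Int) (c : Nat) :
    PySem.Int.floordiv (Step * (c : Int) * ((c : Int) + 1)) 2 = Step * triN c := by
  have h : Step * (c : Int) * ((c : Int) + 1) = 2 * (Step * triN c) := by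
    linear_combination (-Step) * two_triN c
  rw [h, PySem.Int.floordiv_eq_ediv_of_pos (by norm_num)]
  exact Int.mul_ediv_cancel_left _ (by norm_num)

theorem fdiv_tri' (Step : Int) (c : Nat) :
    PySem.Int.floordiv (Step * ((c : Int) + 1) * ((c : Int) + 2)) 2 = Step * triN (c + 1) := by
  have e : Step * ((c : Int) + 1) * ((c : Int) + 2)
      = Step * ((c + 1 : Nat) : Int) * (((c + 1 : Nat) : Int) + 1) := by push_cast; ring
  rw [e, fdiv_tri]

theorem mod_congr (L a b : Int) (hL : 0 < L) (h : a ≡ b [ZMOD L]) :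
    PySem.Int.mod a L = PySem.Int.mod b L := by
  rw [PySem.Int.mod_eq_emod_of_pos hL, PySem.Int.mod_eq_emod_of_pos hL]
  exact h

theorem mod_modeq (a L : Int) (hL : 0 < L) : PySem.Int.mod a L ≡ a [ZMOD L] := by
  rw [PySem.Int.mod_eq_emod_of_pos hL]
  exact Int.emod_emod_of_dvd a dvd_rfl

theorem loop_eq (L Step DShift CShift : Int) (hL : 0 < L) :
    ∀ (n c : Nat) (Quest Point : Int) (Perm : List Int),
      Quest ≡ DShift + Step * triN (c + 1) [ZMOD L] →
      Point ≡ DShift + CShift + Step * triN c [ZMOD L] →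
      (GenerateDTLoop L Step CShift n (c : Int) Quest Point Perm).2 =
        (PySem.List.pyRange (c : Int) ((c : Int) + (n : Int)) 1).foldl (fun Perm i =>
          PySem.List.pySetD Perm
            (PySem.Int.mod (DShift + CShift + PySem.Int.floordiv (Step * i * (i + 1)) 2) L)
            (PySem.Int.mod (DShift + PySem.Int.floordiv (Step * (i + 1) * (i + 2)) 2) L)) Perm ∧
      (GenerateDTLoop L Step CShift n (c : Int) Quest Point Perm).1 ≡
        DShift + CShift + Step * triN (c + n) [ZMOD L] := by
  intro n
  induction n with
  | zero =>
      intro c Quest Point Perm hQ hP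
      simp [GenerateDTLoop, PySem.List.pyRange_one_eq_nil (le_refl ((c : Int)))]
      exact hP
  | succ m ih =>
      intro c Quest Point Perm hQ hP
      have hQ' : PySem.Int.mod Quest L ≡ DShift + Step * triN (c + 1) [ZMOD L] :=
        (mod_modeq Quest L hL).trans hQ
      have key : GenerateDTLoop L Step CShift (m + 1) (c : Int) Quest Point Perm
          = GenerateDTLoop L Step CShift m ((c : Int) + 1)
              (PySem.Int.mod Quest L + ((c : Int) + 1 + 1) * Step)
              (PySem.Int.mod Quest L + CShift)
              (PySem.List.pySetD Perm (PySem.Int.mod Point L) (PySem.Int.mod Quest L)) := by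
          simp only [GenerateDTLoop]
      have e2 : DShift + Step * triN (c + 1) + ((c : Int) + 1 + 1) * Step
          = DShift + Step * triN (c + 1 + 1) := by
        have h := triN_succ (c + 1); push_cast at h; rw [h]; ring
      have hQ2 : PySem.Int.mod Quest L + ((c : Int) + 1 + 1) * Step
          ≡ DShift + Step * triN (c + 1 + 1) [ZMOD L] := by
        calc PySem.Int.mod Quest L + ((c : Int) + 1 + 1) * Step
            ≡ DShift + Step * triN (c + 1) + ((c : Int) + 1 + 1) * Step [ZMOD L] := hQ'.add_right _
          _ = DShift + Step * triN (c + 1 + 1) := e2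
      have hP2 : PySem.Int.mod Quest L + CShift
          ≡ DShift + CShift + Step * triN (c + 1) [ZMOD L] := by
        calc PySem.Int.mod Quest L + CShift
            ≡ DShift + Step * triN (c + 1) + CShift [ZMOD L] := hQ'.add_right _
          _ = DShift + CShift + Step * triN (c + 1) := by ring
      obtain ⟨ih2, ih1⟩ := ih (c + 1) _ _ _ hQ2 hP2
      push_cast at ih2 ih1
      have hPw : PySem.Int.mod Point L
          = PySem.Int.mod (DShift + CShift + PySem.Int.floordiv (Step * (c : Int) * ((c : Int) + 1)) 2) L := by
        rw [fdiv_tri]; exact mod_congr L _ _ hL hP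
      have hQw : PySem.Int.mod Quest L
          = PySem.Int.mod (DShift + PySem.Int.floordiv (Step * ((c : Int) + 1) * ((c : Int) + 2)) 2) L := by
        rw [fdiv_tri']
        exact mod_congr L _ _ hL hQ
      have hrange : PySem.List.pyRange (c : Int) ((c : Int) + ((m : Nat) + 1 : Nat)) 1
          = (c : Int) :: PySem.List.pyRange ((c : Int) + 1) ((c : Int) + ((m : Nat) + 1 : Nat)) 1 := by
        exact PySem.List.pyRange_one_cons (by push_cast; omega)
      constructor
      · rw [key, hrange, List.foldl_cons]
        rw [show (c : Int) + ((m : Nat) + 1 : Nat) = ((c : Int) + 1) + (m : Int) by push_cast; ring]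
        rw [← hPw, ← hQw]
        exact ih2
      · rw [key]
        rw [show c + (m + 1) = c + 1 + m from by omega]
        exact ih1

-- ===== VERDICT (by name: the statement is the Claim_ definition above) =====
theorem GenerateDT_spec : Claim_equal_GenerateDT := by
  unfold Claim_equal_GenerateDT
  intro L Step DShift CShift _hDom hPre
  have hL : 0 < L := hPre
  unfold Spec_GenerateDT GenerateDT GenerateDT_alt
  have hnL : ((L - 1).toNat : Int) = L - 1 := Int.toNat_of_nonneg (by omega)
  have hQ0 : (Step + DShift) ≡ DShift + Step * triN (0 + 1) [ZMOD L] := by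
    have h : DShift + Step * triN (0 + 1) = Step + DShift := by unfold triN; norm_num; ring
    rw [h]
  have hP0 : (DShift + CShift) ≡ DShift + CShift + Step * triN 0 [ZMOD L] := by
    have h : DShift + CShift + Step * triN 0 = DShift + CShift := by unfold triN; norm_num
    rw [h]
  obtain ⟨h2, h1⟩ := loop_eq L Step DShift CShift hL (L - 1).toNat 0 (Step + DShift)
    (DShift + CShift) (List.replicate L.toNat 0) hQ0 hP0
  push_cast [hnL] at h2 h1
  simp only [zero_add] at h2 h1
  have hfd : PySem.Int.floordiv (Step * (L - 1) * L) 2 = Step * triN (L - 1).toNat := by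
    have e : Step * (L - 1) * L = Step * (((L - 1).toNat : Nat) : Int) * ((((L - 1).toNat : Nat) : Int) + 1) := by
      rw [hnL]; ring
    rw [e, fdiv_tri]
  have hmod : PySem.Int.mod (GenerateDTLoop L Step CShift (L - 1).toNat 0 (Step + DShift)
        (DShift + CShift) (List.replicate L.toNat 0)).1 L
      = PySem.Int.mod (DShift + CShift + PySem.Int.floordiv (Step * (L - 1) * L) 2) L := by
    rw [hfd]; exact mod_congr L _ _ hL h1
  dsimp only
  rw [hmod, h2]
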